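-- pv_equiv track=rewrite | github.com/DarkPr0digy/MORPH_SEGMENT | Conditional Random Fields/morphology/DataCleaner.py | get_surface_segments
-- ===== SOURCE A (Python) =====
-- def get_surface_segments(ortho: str):
--     """
--     Method to extract the segments from the orthographic form of the word
--     :param orthographic: the orthographic form of the word
--     :return: list of all the segments in the word
--     """
--     segments = []
--     tmp = ''
--     label = False
--
--     # Get all segments from orthographic form
--     for char in ortho:
--         if char == '[':
--             segments.append(tmp)
--             tmp = ''
--             label = True
--         elif char == ']':
--             label = False
--         elif not label:
--             tmp += char
--     return segments
-- ===== SOURCE B (Python) =====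
-- def get_surface_segments(ortho: str):
--     # split-first reshape: one segment per '['; pending text carried as ']'-split pieces
--     parts = ortho.split('[')
--     segs = []
--     carry = parts[0].split(']')
--     for part in parts[1:]:
--         segs.append(''.join(carry))
--         carry = part.split(']')[1:]
--     return segs
-- ===== Notes on version B (the rewrite author's own statement) =====
-- stated objective: faster
-- what changed: Replaces A's char-by-char state machine (label flag, growing tmp string) with a split-first pass: split the word on the opening bracket, seed the pending segment from the first part split on the closing bracket, then for each later part emit the joined pending pieces and recompute the carry from that part's pieces after the first closing bracket.
import Mathlib
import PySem

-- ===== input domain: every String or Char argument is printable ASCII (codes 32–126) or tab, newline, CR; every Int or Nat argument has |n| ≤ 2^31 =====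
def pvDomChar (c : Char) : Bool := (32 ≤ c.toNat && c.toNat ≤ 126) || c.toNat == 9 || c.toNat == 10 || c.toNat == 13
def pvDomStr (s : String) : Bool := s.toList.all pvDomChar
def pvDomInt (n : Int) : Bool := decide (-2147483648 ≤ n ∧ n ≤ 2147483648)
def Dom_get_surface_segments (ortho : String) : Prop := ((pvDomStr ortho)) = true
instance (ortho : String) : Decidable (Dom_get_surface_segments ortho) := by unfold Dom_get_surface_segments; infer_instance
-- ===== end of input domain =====

-- B replaces A's char-by-char label state machine by a split-first pass that reshapes each part;
-- a timing run measured B faster (bulk split/join instead of per-char appends).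

-- ===== PORT A =====
-- loop body of A's for-loop; state = (segments, tmp, label)
def aStep (st : List (List Char) × List Char × Bool) (ch : Char) :
    List (List Char) × List Char × Bool :=
  if ch = '[' then (st.1 ++ [st.2.1], [], true)
  else if ch = ']' then (st.1, st.2.1, false)
  else if st.2.2 = false then (st.1, st.2.1 ++ [ch], st.2.2)
  else st

def get_surface_segments (ortho : String) : List String :=
  ((ortho.toList.foldl aStep ([], [], false)).1).map String.ofList

-- ===== PORT B =====
-- loop body of B's for-loop; state = (segs, carry)
def bStep (st : List String × List (List Char)) (part : List Char) :
    List String × List (List Char) :=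
  (st.1 ++ [String.ofList (PySem.Chars.join [] st.2)],
   (PySem.Chars.splitOn part [']']).drop 1)

def get_surface_segments_alt (ortho : String) : List String :=
  let parts := PySem.Chars.splitOn ortho.toList ['[']   -- ortho.split('[')
  -- parts[0]: str.split always returns a non-empty list, so headD never takes its default
  ((parts.drop 1).foldl bStep ([], PySem.Chars.splitOn (parts.headD []) [']'])).1

-- ===== PRECONDITION & SPEC =====
def Spec_get_surface_segments (ortho : String) (out : List String) : Prop := out = get_surface_segments_alt ortho
instance (ortho : String) (out : List String) : Decidable (Spec_get_surface_segments ortho out) := by unfold Spec_get_surface_segments; infer_instance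

-- ===== CLAIM (what is proved, stated in full; the proofs are below) =====
def Claim_equal_get_surface_segments : Prop := ∀ (ortho : String), Dom_get_surface_segments ortho → Spec_get_surface_segments ortho (get_surface_segments ortho)

-- ===== LEMMAS AND PROOFS =====

-- reference spec of A's state machine: gSpec label tmp cs = segments still to be emitted
def gSpec : Bool → List Char → List Char → List (List Char)
  | _, _, [] => []
  | label, tmp, c :: cs =>
    if c = '[' then tmp :: gSpec true [] cs
    else if c = ']' then gSpec false tmp cs
    else if label = false then gSpec false (tmp ++ [c]) cs
    else gSpec true tmp cs

-- reference spec of B's part chain: hSpec pending parts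
def hSpec : List Char → List (List Char) → List (List Char)
  | _, [] => []
  | pending, p :: ps => pending :: hSpec ((p.splitOn ']').drop 1).flatten ps

theorem splitOn_ne_nil (k : Char) (cs : List Char) : cs.splitOn k ≠ [] := by
  simp only [List.splitOn]
  induction cs with
  | nil => simp
  | cons c cs ih =>
      rw [List.splitOnP_cons]; split_ifs <;> [simp; skip] <;>
        cases h : cs.splitOnP (· == k) <;> simp_all

theorem splitOn_cons_ne (c k : Char) (cs : List Char) (h : ¬ c = k) :
    (c :: cs).splitOn k = (cs.splitOn k).modifyHead (c :: ·) := by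
  simp [List.splitOn, List.splitOnP_cons, h]

theorem splitOn_cons_self (k : Char) (cs : List Char) :
    (k :: cs).splitOn k = [] :: cs.splitOn k := by
  simp [List.splitOn, List.splitOnP_cons]

theorem intercalate_nil_eq_flatten (xs : List (List Char)) :
    List.intercalate [] xs = xs.flatten := by
  induction xs with
  | nil => simp [List.intercalate]
  | cons x xs ih => cases xs <;> simp_all [List.intercalate, List.intersperse]

-- PySem's fueled splitOn on a one-char separator is core List.splitOn
theorem pysem_splitOn_go (k : Char) :
    ∀ (fuel : Nat) (l cur : List Char) (acc : List (List Char)), l.length < fuel →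
      PySem.Chars.splitOn.go [k] fuel l cur acc =
        acc.reverse ++ (l.splitOn k).modifyHead (cur.reverse ++ ·) := by
  intro fuel
  induction fuel with
  | zero => intro l cur acc h; omega
  | succ fuel ih =>
      intro l cur acc h
      cases l with
      | nil => simp [PySem.Chars.splitOn.go, List.splitOn]
      | cons c rest =>
          by_cases hc : k = c
          · subst hc
            rw [PySem.Chars.splitOn.go]
            simp only [List.isPrefixOf, List.splitOn, List.splitOnP_cons]
            simp only [beq_self_eq_true, Bool.true_and, List.isPrefixOf]
            rw [ih _ _ _ (by simpa using Nat.lt_of_succ_lt_succ h)]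
            simp only [List.splitOn]
            cases hr : rest.splitOnP (· == k) <;> simp [hr]
          · rw [PySem.Chars.splitOn.go]
            have hpre : List.isPrefixOf [k] (c :: rest) = false := by
              simp [List.isPrefixOf]; exact fun hkc => absurd hkc hc
            rw [hpre]
            simp only [Bool.false_eq_true, if_false]
            rw [ih _ _ _ (by simpa using Nat.lt_of_succ_lt_succ h)]
            rw [splitOn_cons_ne c k rest (fun hck => hc hck.symm)]
            cases hr : rest.splitOn k with
            | nil => exact absurd hr (splitOn_ne_nil k rest)
            | cons p ps => simp

theorem pysem_splitOn_eq (cs : List Char) (k : Char) :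
    PySem.Chars.splitOn cs [k] = cs.splitOn k := by
  rw [PySem.Chars.splitOn, pysem_splitOn_go k _ _ _ _ (by omega)]
  cases h : cs.splitOn k with
  | nil => exact absurd h (splitOn_ne_nil k cs)
  | cons p ps => simp

theorem flatten_splitOn (cs : List Char) (k : Char) :
    (cs.splitOn k).flatten = cs.filter (· ≠ k) := by
  induction cs with
  | nil => simp [List.splitOn]
  | cons c cs ih =>
      by_cases hc : c = k
      · subst hc
        simp [splitOn_cons_self, ih]
      · rw [splitOn_cons_ne c k cs hc]
        cases h : cs.splitOn k with
        | nil => exact absurd h (splitOn_ne_nil k cs)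
        | cons p ps =>
            have := ih; rw [h] at this
            simp_all [List.filter_cons, hc]

-- A's loop accumulates exactly gSpec
theorem aFold_eq : ∀ (cs : List Char) (segs : List (List Char)) (tmp : List Char) (label : Bool),
    (cs.foldl aStep (segs, tmp, label)).1 = segs ++ gSpec label tmp cs := by
  intro cs
  induction cs with
  | nil => intro segs tmp label; simp [gSpec]
  | cons c cs ih =>
      intro segs tmp label
      by_cases h1 : c = '['
      · subst h1; simp [List.foldl_cons, aStep, gSpec, ih]
      · by_cases h2 : c = ']'
        · subst h2; simp [List.foldl_cons, aStep, gSpec, h1, ih]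
        · cases label with
          | false => simp [List.foldl_cons, aStep, gSpec, h1, h2, ih]
          | true => simp [List.foldl_cons, aStep, gSpec, h1, h2, ih]

-- B's loop accumulates exactly hSpec
theorem bFold_eq : ∀ (parts : List (List Char)) (segs : List String) (carry : List (List Char)),
    (parts.foldl bStep (segs, carry)).1 = segs ++ (hSpec carry.flatten parts).map String.ofList := by
  intro parts
  induction parts with
  | nil => intro segs carry; simp [hSpec]
  | cons p ps ih =>
      intro segs carry
      rw [List.foldl_cons]
      show ((ps.foldl bStep (bStep (segs, carry) p)).1) = _
      rw [bStep]
      rw [ih]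
      simp [hSpec, PySem.Chars.join, intercalate_nil_eq_flatten, pysem_splitOn_eq]

-- the state machine equals the part chain (both label modes at once)
theorem gSpec_eq_hSpec : ∀ (cs tmp p0 : List Char) (rest : List (List Char)),
    cs.splitOn '[' = p0 :: rest →
    gSpec false tmp cs = hSpec (tmp ++ p0.filter (· ≠ ']')) rest ∧
    gSpec true tmp cs = hSpec (tmp ++ ((p0.splitOn ']').drop 1).flatten) rest := by
  intro cs
  induction cs with
  | nil =>
      intro tmp p0 rest h
      have h' : ([[]] : List (List Char)) = p0 :: rest := by simpa [List.splitOn] using h.symm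
      injection h' with hp0 hrest
      subst hp0; rw [← hrest]
      simp [gSpec, hSpec]
  | cons c cs ih =>
      intro tmp p0 rest h
      by_cases h1 : c = '['
      · subst h1
        rw [splitOn_cons_self] at h
        injection h with hp0 hrest
        subst hp0
        cases hq : cs.splitOn '[' with
        | nil => exact absurd hq (splitOn_ne_nil _ _)
        | cons q0 qs =>
            rw [hq] at hrest; rw [← hrest]
            have IH := (ih [] q0 qs hq).2
            constructor
            · rw [show gSpec false tmp ('[' :: cs) = tmp :: gSpec true [] cs from by
                simp [gSpec]]
              rw [show hSpec (tmp ++ List.filter (· ≠ ']') []) (q0 :: qs) =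
                  tmp :: hSpec ((q0.splitOn ']').drop 1).flatten qs from by simp [hSpec]]
              rw [IH]; simp
            · rw [show gSpec true tmp ('[' :: cs) = tmp :: gSpec true [] cs from by
                simp [gSpec]]
              rw [show hSpec (tmp ++ ((([] : List Char).splitOn ']').drop 1).flatten) (q0 :: qs) =
                  tmp :: hSpec ((q0.splitOn ']').drop 1).flatten qs from by
                simp [hSpec, List.splitOn]]
              rw [IH]; simp
      · by_cases h2 : c = ']'
        · subst h2
          rw [splitOn_cons_ne ']' '[' cs (by decide)] at h
          cases hq : cs.splitOn '[' with
          | nil => exact absurd hq (splitOn_ne_nil _ _)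
          | cons q0 qs =>
              rw [hq] at h
              simp only [List.modifyHead_cons] at h
              injection h with hp0 hrest
              subst hp0; rw [← hrest]
              have IH := (ih tmp q0 qs hq).1
              constructor
              · rw [show gSpec false tmp (']' :: cs) = gSpec false tmp cs from by
                  simp [gSpec]]
                rw [IH]; simp
              · rw [show gSpec true tmp (']' :: cs) = gSpec false tmp cs from by
                  simp [gSpec]]
                rw [IH]
                rw [splitOn_cons_self]
                simp [flatten_splitOn]
        · rw [splitOn_cons_ne c '[' cs h1] at h
          cases hq : cs.splitOn '[' with
          | nil => exact absurd hq (splitOn_ne_nil _ _)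
          | cons q0 qs =>
              rw [hq] at h
              simp only [List.modifyHead_cons] at h
              injection h with hp0 hrest
              subst hp0; rw [← hrest]
              have hq0 : ((c :: q0).splitOn ']') = ((q0.splitOn ']').modifyHead (c :: ·)) :=
                splitOn_cons_ne c ']' q0 h2
              constructor
              · rw [show gSpec false tmp (c :: cs) = gSpec false (tmp ++ [c]) cs from by
                  simp [gSpec, h1, h2]]
                rw [(ih (tmp ++ [c]) q0 qs hq).1]
                simp [h2]
              · rw [show gSpec true tmp (c :: cs) = gSpec true tmp cs from by
                  simp [gSpec, h1, h2]]
                rw [(ih tmp q0 qs hq).2, hq0]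
                cases hr : q0.splitOn ']' with
                | nil => exact absurd hr (splitOn_ne_nil _ _)
                | cons r0 rs => simp

-- ===== VERDICT (by name: the statement is the Claim_ definition above) =====
theorem get_surface_segments_spec : Claim_equal_get_surface_segments := by
  intro ortho _
  show get_surface_segments ortho = get_surface_segments_alt ortho
  rw [get_surface_segments, get_surface_segments_alt]
  simp only [aFold_eq, bFold_eq, pysem_splitOn_eq]
  cases hq : ortho.toList.splitOn '[' with
  | nil => exact absurd hq (splitOn_ne_nil _ _)
  | cons p0 rest =>
      rw [(gSpec_eq_hSpec ortho.toList [] p0 rest hq).1]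
      simp [flatten_splitOn]
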